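-- pv_equiv track=rewrite | github.com/AmrYami/co-pilot | apps/dw/rate_comment.py | _extract_flags
-- ===== SOURCE A (Python) =====
-- from typing import Dict, Iterator, List, Optional, Tuple
--
-- def _extract_flags(flag_blob: str) -> Tuple[bool, bool, bool]:
--     ci = False
--     trim = False
--     valid = True
--     if not flag_blob:
--         return ci, trim, False
--     seen_any = False
--     for flag in flag_blob.split(","):
--         name = flag.strip().lower()
--         if not name:
--             continue
--         seen_any = True
--         if name in {"ci", "case_insensitive"}:
--             ci = True
--         elif name == "trim":
--             trim = True
--         else:
--             valid = False
--     return ci, trim, valid and seen_any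
-- ===== SOURCE B (Python) =====
-- def _extract_flags(flag_blob):
--     toks = {n for t in flag_blob.split(",") if (n := t.strip().lower())}
--     known = {"ci", "case_insensitive", "trim"}
--     ci = bool(toks & {"ci", "case_insensitive"})
--     trim = "trim" in toks
--     valid = bool(toks) and toks <= known
--     return ci, trim, valid
-- ===== Notes on version B (the rewrite author's own statement) =====
-- stated objective: simpler
-- what changed: collect the normalized tokens into a set first, then derive ci/trim/valid with set operations (intersection, membership, subset) instead of A's per-token branch loop with ci/trim/valid/seen_any accumulators
import Mathlib
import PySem

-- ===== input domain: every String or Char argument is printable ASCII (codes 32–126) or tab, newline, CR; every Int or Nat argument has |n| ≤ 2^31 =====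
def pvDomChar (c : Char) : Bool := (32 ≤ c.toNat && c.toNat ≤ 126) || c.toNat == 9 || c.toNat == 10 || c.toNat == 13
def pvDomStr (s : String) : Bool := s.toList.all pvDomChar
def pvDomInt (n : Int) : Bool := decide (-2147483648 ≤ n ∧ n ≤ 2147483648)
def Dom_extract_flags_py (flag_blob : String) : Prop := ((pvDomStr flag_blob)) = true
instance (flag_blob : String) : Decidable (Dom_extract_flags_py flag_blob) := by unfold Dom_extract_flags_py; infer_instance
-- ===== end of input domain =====

-- B builds the set of normalized tokens once and derives ci/trim/valid with set
-- operations, replacing A's per-token branch loop with four accumulators.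

-- ===== PORT A =====
-- name = flag.strip().lower()
def pvNormA (t : String) : String := PySem.Str.lower (PySem.Str.strip t)

-- the for-loop over the split pieces, state (ci, trim, valid, seen_any)
def pvLoopA : List String → (Bool × Bool × Bool × Bool) → Bool × Bool × Bool × Bool
  | [], st => st
  | f :: rest, (ci, trim, valid, seen) =>
    let name := pvNormA f
    if name = "" then pvLoopA rest (ci, trim, valid, seen)
    else if name = "ci" ∨ name = "case_insensitive" then pvLoopA rest (true, trim, valid, true)
    else if name = "trim" then pvLoopA rest (ci, true, valid, true)
    else pvLoopA rest (ci, trim, false, true)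

def extract_flags_py (flag_blob : String) : Bool × Bool × Bool :=
  if flag_blob = "" then (false, false, false)
  else
    let r := pvLoopA ((PySem.Str.split? flag_blob ",").getD []) (false, false, true, false)
    (r.1, r.2.1, r.2.2.1 && r.2.2.2)

-- ===== PORT B =====
-- n = t.strip().lower()
def pvNormB (t : String) : String := PySem.Str.lower (PySem.Str.strip t)

def extract_flags_py_alt (flag_blob : String) : Bool × Bool × Bool :=
  let toks : PySem.Set String :=
    PySem.Set.ofList ((((PySem.Str.split? flag_blob ",").getD []).map pvNormB).filter (fun n => n ≠ ""))
  let known : PySem.Set String := PySem.Set.ofList ["ci", "case_insensitive", "trim"]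
  let ci := !(PySem.Set.inter toks (PySem.Set.ofList ["ci", "case_insensitive"])).isEmpty
  let trim := PySem.Set.contains toks "trim"
  let valid := !toks.isEmpty && PySem.Set.issubset toks known
  (ci, trim, valid)

-- ===== PRECONDITION & SPEC =====
def Spec_extract_flags_py (flag_blob : String) (out : Bool × Bool × Bool) : Prop := out = extract_flags_py_alt flag_blob
instance (flag_blob : String) (out : Bool × Bool × Bool) : Decidable (Spec_extract_flags_py flag_blob out) := by unfold Spec_extract_flags_py; infer_instance

-- ===== CLAIM (what is proved, stated in full; the proofs are below) =====
def Claim_equal_extract_flags_py : Prop := ∀ (flag_blob : String), Dom_extract_flags_py flag_blob → Spec_extract_flags_py flag_blob (extract_flags_py flag_blob)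

-- ===== LEMMAS AND PROOFS =====

theorem any_ext (l : List String) (p q : String → Bool) (h : ∀ x, p x = q x) :
    l.any p = l.any q := by
  induction l with
  | nil => rfl
  | cons a l ih => simp [List.any_cons, h, ih]

theorem all_ext (l : List String) (p q : String → Bool) (h : ∀ x, p x = q x) :
    l.all p = l.all q := by
  induction l with
  | nil => rfl
  | cons a l ih => simp [List.all_cons, h, ih]

-- A's loop computes: ci once some token is ci/case_insensitive, trim once some token is
-- trim, valid while every nonempty token is known, seen once some token is nonempty.
theorem pvLoopA_spec (l : List String) (ci trim valid seen : Bool) :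
    pvLoopA l (ci, trim, valid, seen) =
      (ci || l.any (fun t => pvNormA t = "ci" || pvNormA t = "case_insensitive"),
       trim || l.any (fun t => pvNormA t = "trim"),
       valid && l.all (fun t => pvNormA t = "" || pvNormA t = "ci" ||
                                pvNormA t = "case_insensitive" || pvNormA t = "trim"),
       seen || l.any (fun t => pvNormA t ≠ "")) := by
  induction l generalizing ci trim valid seen with
  | nil => simp [pvLoopA]
  | cons f rest ih =>
    simp only [pvLoopA]
    by_cases h0 : pvNormA f = ""
    · simp [h0, ih]
    · by_cases h1 : pvNormA f = "ci" ∨ pvNormA f = "case_insensitive"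
      · rcases h1 with h1 | h1 <;>
          simp [h0, h1, ih, Bool.or_left_comm, Bool.or_assoc, Bool.and_assoc]
      · push_neg at h1
        by_cases h2 : pvNormA f = "trim"
        · simp [h0, h1.1, h1.2, h2, ih, Bool.or_left_comm, Bool.or_assoc, Bool.and_assoc]
        · simp [h0, h1.1, h1.2, h2, ih, Bool.or_left_comm, Bool.or_assoc, Bool.and_assoc]

-- the filtered token list sees exactly the nonempty normalized tokens
theorem all_mem_ext (l : List String) (p q : String → Bool) (h : ∀ x ∈ l, p x = q x) :
    l.all p = l.all q := by
  induction l with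
  | nil => rfl
  | cons a l ih =>
    rw [List.all_cons, List.all_cons, h a (by simp), ih (fun x hx => h x (by simp [hx]))]

theorem filter_any (L : List String) (p : String → Bool) (hp : p "" = false) :
    ((L.map pvNormA).filter (fun n => n ≠ "")).any p = L.any (fun t => p (pvNormA t)) := by
  induction L with
  | nil => simp
  | cons t l ih =>
    rw [List.map_cons, List.filter_cons]
    by_cases h : pvNormA t = ""
    · rw [if_neg (by simp [h]), ih, List.any_cons, h, hp, Bool.false_or]
    · rw [if_pos (by simp [h]), List.any_cons, List.any_cons, ih]

theorem filter_all (L : List String) (p : String → Bool) (hp : p "" = true) :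
    ((L.map pvNormA).filter (fun n => n ≠ "")).all p = L.all (fun t => p (pvNormA t)) := by
  induction L with
  | nil => simp
  | cons t l ih =>
    rw [List.map_cons, List.filter_cons]
    by_cases h : pvNormA t = ""
    · rw [if_neg (by simp [h]), ih, List.all_cons, h, hp, Bool.true_and]
    · rw [if_pos (by simp [h]), List.all_cons, List.all_cons, ih]

theorem filter_nonempty (L : List String) :
    ((L.map pvNormA).filter (fun n => n ≠ "")).any (fun _ => true) =
      L.any (fun t => pvNormA t ≠ "") := by
  induction L with
  | nil => simp
  | cons t l ih =>
    rw [List.map_cons, List.filter_cons]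
    by_cases h : pvNormA t = ""
    · rw [if_neg (by simp [h]), ih, List.any_cons, h]
      simp
    · rw [if_pos (by simp [h]), List.any_cons, List.any_cons, ih]
      simp [h]

-- Bool characterizations of B's set operations over the underlying token list
theorem inter_nonempty (s : List String) (t : PySem.Set String) :
    (!(PySem.Set.inter (PySem.Set.ofList s) t).isEmpty) =
      s.any (fun x => PySem.Set.contains t x) := by
  rw [Bool.eq_iff_iff]
  simp only [Bool.not_eq_eq_eq_not, Bool.not_true, List.isEmpty_eq_false_iff_exists_mem,
    PySem.Set.mem_inter, PySem.Set.mem_ofList, List.any_eq_true, PySem.Set.contains_iff]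

theorem ofList_nonempty (s : List String) :
    (!(PySem.Set.ofList s : PySem.Set String).isEmpty) = s.any (fun _ => true) := by
  rw [Bool.eq_iff_iff]
  simp only [Bool.not_eq_eq_eq_not, Bool.not_true, List.isEmpty_eq_false_iff_exists_mem,
    PySem.Set.mem_ofList, List.any_eq_true]
  constructor
  · rintro ⟨x, hx⟩; exact ⟨x, hx, trivial⟩
  · rintro ⟨x, hx, -⟩; exact ⟨x, hx⟩

theorem ofList_contains (s : List String) (x : String) :
    PySem.Set.contains (PySem.Set.ofList s) x = s.any (fun y => y = x) := by
  rw [Bool.eq_iff_iff]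
  simp only [PySem.Set.contains_iff, PySem.Set.mem_ofList, List.any_eq_true,
    decide_eq_true_eq]
  constructor
  · intro h; exact ⟨x, h, rfl⟩
  · rintro ⟨y, hy, rfl⟩; exact hy

theorem ofList_issubset (s : List String) (t : PySem.Set String) :
    PySem.Set.issubset (PySem.Set.ofList s) t = s.all (fun x => PySem.Set.contains t x) := by
  rw [Bool.eq_iff_iff]
  simp only [PySem.Set.issubset_iff, PySem.Set.mem_ofList, List.all_eq_true,
    PySem.Set.contains_iff]

theorem contains_two (x : String) :
    PySem.Set.contains (PySem.Set.ofList ["ci", "case_insensitive"]) x =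
      (decide (x = "ci") || decide (x = "case_insensitive")) := by
  rw [Bool.eq_iff_iff]
  simp [PySem.Set.contains_iff, PySem.Set.mem_ofList]

theorem contains_three (x : String) :
    PySem.Set.contains (PySem.Set.ofList ["ci", "case_insensitive", "trim"]) x =
      (decide (x = "ci") || decide (x = "case_insensitive") || decide (x = "trim")) := by
  rw [Bool.eq_iff_iff]
  simp [PySem.Set.contains_iff, PySem.Set.mem_ofList, or_assoc]

-- ===== VERDICT (by name: the statement is the Claim_ definition above) =====
theorem extract_flags_py_spec : Claim_equal_extract_flags_py := by
  intro s _
  show extract_flags_py s = extract_flags_py_alt s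
  by_cases hs : s = ""
  · subst hs; rfl
  · simp only [extract_flags_py, extract_flags_py_alt, if_neg hs,
      show pvNormB = pvNormA from rfl, pvLoopA_spec, Bool.false_or, Bool.true_and,
      Prod.mk.injEq]
    refine ⟨?_, ?_, ?_⟩
    · rw [inter_nonempty, filter_any _ _ (by decide)]
      exact (any_ext _ _ _ (fun t => contains_two (pvNormA t))).symm
    · rw [ofList_contains, filter_any _ _ (by decide)]
    · rw [ofList_nonempty, ofList_issubset, filter_nonempty,
        all_mem_ext _ (fun x => PySem.Set.contains (PySem.Set.ofList ["ci", "case_insensitive", "trim"]) x)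
          (fun n => decide (n = "") || PySem.Set.contains (PySem.Set.ofList ["ci", "case_insensitive", "trim"]) n)
          (fun x hx => by
            have hne : ¬ x = "" := by simpa using (List.mem_filter.1 hx).2
            simp [hne]),
        filter_all _ _ (by decide), Bool.and_comm]
      exact congrArg (fun b => (((PySem.Str.split? s ",").getD []).any fun t => decide (pvNormA t ≠ "")) && b)
        (all_ext ((PySem.Str.split? s ",").getD [])
          (fun t => decide (pvNormA t = "") || decide (pvNormA t = "ci") ||
                    decide (pvNormA t = "case_insensitive") || decide (pvNormA t = "trim"))
          (fun t => decide (pvNormA t = "") ||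
                    PySem.Set.contains (PySem.Set.ofList ["ci", "case_insensitive", "trim"]) (pvNormA t))
          (fun t => by simp only [contains_three, Bool.or_assoc]))
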